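-- pv_equiv track=rewrite | github.com/kanishkaag12/Hiring-Predictor | python/resume_parser.py | infer_soft_skills_from_responsibilities
-- ===== SOURCE A (Python) =====
-- from typing import Dict, List, Any, Tuple, Optional
--
-- def infer_soft_skills_from_responsibilities(responsibilities: List[str]) -> List[str]:
--     """Infer soft skills from action verbs in responsibilities.
--     STRICT: Only infer from actual responsibility verbs.
--     """
--     soft_skills = set()
--
--     # Verb to soft skill mapping
--     verb_soft_skill_map = {
--         'collaborated': ['collaboration', 'teamwork'],
--         'cooperated': ['collaboration', 'teamwork'],
--         'partnered': ['teamwork', 'collaboration'],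
--         'developed': ['problem solving', 'technical thinking'],
--         'designed': ['problem solving', 'creativity'],
--         'improved': ['problem solving', 'analytical thinking'],
--         'optimized': ['analytical thinking', 'problem solving'],
--         'evaluated': ['analytical thinking', 'critical thinking'],
--         'led': ['leadership'],
--         'managed': ['leadership'],
--         'mentored': ['leadership'],
--         'presented': ['communication', 'presentation'],
--         'communicated': ['communication'],
--         'negotiated': ['communication', 'negotiation'],
--         'delegated': ['leadership'],
--         'coordinated': ['teamwork', 'collaboration'],
--         'resolved': ['problem solving', 'conflict resolution'],
--     }
--
--     for responsibility in responsibilities: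
--         responsibility_lower = responsibility.lower()
--         for verb, skills in verb_soft_skill_map.items():
--             if verb in responsibility_lower:
--                 soft_skills.update(skills)
--
--     return list(soft_skills)
-- ===== SOURCE B (Python) =====
-- # B: inverted index — for each SKILL, the verbs that imply it; one pass over the
-- # skill table against a single lowercased combined text ("\n"-joined), instead of
-- # A's per-responsibility scan of the verb->skills map with incremental set updates.
-- _SKILL_TO_VERBS = {
--     'collaboration': ['collaborated', 'cooperated', 'partnered', 'coordinated'],
--     'teamwork': ['collaborated', 'cooperated', 'partnered', 'coordinated'],
--     'problem solving': ['developed', 'designed', 'improved', 'optimized', 'resolved'],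
--     'technical thinking': ['developed'],
--     'creativity': ['designed'],
--     'analytical thinking': ['improved', 'optimized', 'evaluated'],
--     'critical thinking': ['evaluated'],
--     'leadership': ['led', 'managed', 'mentored', 'delegated'],
--     'communication': ['presented', 'communicated', 'negotiated'],
--     'presentation': ['presented'],
--     'negotiation': ['negotiated'],
--     'conflict resolution': ['resolved'],
-- }
--
--
-- def infer_soft_skills_from_responsibilities(responsibilities):
--     """Infer soft skills from action verbs in responsibilities.
--
--     B: join all responsibilities into one text, lowercase it once, then keep
--     each skill of the inverted skill->verbs index whose verb list has a hit.
--     ('\n' occurs in no verb, so joining loses/creates no match.)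
--     """
--     text = "\n".join(responsibilities).lower()
--     return list({skill
--                  for skill, verbs in _SKILL_TO_VERBS.items()
--                  if any(verb in text for verb in verbs)})
-- ===== Notes on version B (the rewrite author's own statement) =====
-- stated objective: faster
-- what changed: B replaces A's nested loop (each responsibility lowercased and scanned against the verb->skills dict, updating a set) by an inverted skill->verbs index: all responsibilities are joined into one text lowercased once, and each of the 12 skills is kept iff any of its verbs occurs in that single text; the result set is the same because the inverted table contains exactly the (verb, skill) pairs of A's map and '\n' occurs in no verb.
import Mathlib
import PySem

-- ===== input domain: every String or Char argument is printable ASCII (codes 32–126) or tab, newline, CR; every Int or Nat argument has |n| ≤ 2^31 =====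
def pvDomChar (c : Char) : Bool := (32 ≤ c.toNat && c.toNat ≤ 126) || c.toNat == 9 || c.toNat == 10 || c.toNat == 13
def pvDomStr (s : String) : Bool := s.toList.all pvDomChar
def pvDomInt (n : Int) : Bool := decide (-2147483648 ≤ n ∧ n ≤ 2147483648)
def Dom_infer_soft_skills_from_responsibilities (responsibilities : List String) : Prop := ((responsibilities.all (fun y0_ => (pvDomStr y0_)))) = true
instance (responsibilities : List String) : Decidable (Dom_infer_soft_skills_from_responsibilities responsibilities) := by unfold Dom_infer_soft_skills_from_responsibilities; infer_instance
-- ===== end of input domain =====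

-- B replaces A's nested per-responsibility × per-verb scan with a set accumulator by an
-- INVERTED skill→verbs index: join all responsibilities into one "\n"-separated text,
-- lowercase it once, and keep each skill whose verb list has a substring hit in that text
-- (objective: different algorithm; a timing run measured B faster on the generated inputs).
-- Python returns list(set …): a set's iteration order is not modelled (outputs are
-- compared as sets), so BOTH ports render list(set) canonically as the sorted element list.

-- ===== PORT A =====
-- verb_soft_skill_map, a dict literal iterated in insertion order
def pvVerbMap : List (String × List String) := [
  ("collaborated", ["collaboration", "teamwork"]),
  ("cooperated", ["collaboration", "teamwork"]),
  ("partnered", ["teamwork", "collaboration"]),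
  ("developed", ["problem solving", "technical thinking"]),
  ("designed", ["problem solving", "creativity"]),
  ("improved", ["problem solving", "analytical thinking"]),
  ("optimized", ["analytical thinking", "problem solving"]),
  ("evaluated", ["analytical thinking", "critical thinking"]),
  ("led", ["leadership"]),
  ("managed", ["leadership"]),
  ("mentored", ["leadership"]),
  ("presented", ["communication", "presentation"]),
  ("communicated", ["communication"]),
  ("negotiated", ["communication", "negotiation"]),
  ("delegated", ["leadership"]),
  ("coordinated", ["teamwork", "collaboration"]),
  ("resolved", ["problem solving", "conflict resolution"])]

-- literal port of A: for each responsibility (lowercased), scan every (verb, skills) pair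
def infer_soft_skills_from_responsibilities (responsibilities : List String) : List String :=
  let soft_skills : PySem.Set String :=
    responsibilities.foldl (fun s responsibility =>
      pvVerbMap.foldl (fun s vp =>
        if PySem.Str.isIn vp.1 (PySem.Str.lower responsibility) then PySem.Set.update s vp.2 else s) s)
      PySem.Set.empty
  PySem.List.sorted soft_skills (fun x => x)

-- ===== PORT B =====
-- _SKILL_TO_VERBS: the inverted index of Source B, a dict literal in insertion order
def pvSkillVerbs : List (String × List String) := [
  ("collaboration", ["collaborated", "cooperated", "partnered", "coordinated"]),
  ("teamwork", ["collaborated", "cooperated", "partnered", "coordinated"]),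
  ("problem solving", ["developed", "designed", "improved", "optimized", "resolved"]),
  ("technical thinking", ["developed"]),
  ("creativity", ["designed"]),
  ("analytical thinking", ["improved", "optimized", "evaluated"]),
  ("critical thinking", ["evaluated"]),
  ("leadership", ["led", "managed", "mentored", "delegated"]),
  ("communication", ["presented", "communicated", "negotiated"]),
  ("presentation", ["presented"]),
  ("negotiation", ["negotiated"]),
  ("conflict resolution", ["resolved"])]

-- literal port of B: one combined lowercased text, filter the skill table by "any verb in text"
def infer_soft_skills_from_responsibilities_alt (responsibilities : List String) : List String :=
  let text := PySem.Str.lower (PySem.Str.join "\n" responsibilities)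
  PySem.List.sorted
    (PySem.Set.ofList
      ((pvSkillVerbs.filter (fun sv => sv.2.any (fun verb => PySem.Str.isIn verb text))).map
        (fun sv => sv.1)))
    (fun x => x)

-- ===== PRECONDITION & SPEC =====
def Spec_infer_soft_skills_from_responsibilities (responsibilities : List String) (out : List String) : Prop := out = infer_soft_skills_from_responsibilities_alt responsibilities
instance (responsibilities : List String) (out : List String) : Decidable (Spec_infer_soft_skills_from_responsibilities responsibilities out) := by unfold Spec_infer_soft_skills_from_responsibilities; infer_instance

-- ===== CLAIM (what is proved, stated in full; the proofs are below) =====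
def Claim_equal_infer_soft_skills_from_responsibilities : Prop := ∀ (responsibilities : List String), Dom_infer_soft_skills_from_responsibilities responsibilities → Spec_infer_soft_skills_from_responsibilities responsibilities (infer_soft_skills_from_responsibilities responsibilities)

-- ===== LEMMAS AND PROOFS =====
theorem pv_prefix_split {α : Type} (l a b : List α) (c : α) (h : l <+: a ++ c :: b) (hc : c ∉ l) : l <+: a := by
  induction l generalizing a with
  | nil => exact List.nil_prefix
  | cons y l' ih =>
    cases a with
    | nil =>
      rcases List.cons_prefix_cons.mp h with ⟨rfl, _⟩
      exact absurd (List.mem_cons_self) hc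
    | cons z a' =>
      rcases List.cons_prefix_cons.mp h with ⟨rfl, h'⟩
      exact List.cons_prefix_cons.mpr ⟨rfl, ih a' h' (fun hm => hc (List.mem_cons_of_mem _ hm))⟩

theorem pv_infix_split {α : Type} (l a b : List α) (c : α) (h : l <:+: a ++ c :: b) (hc : c ∉ l) : l <:+: a ∨ l <:+: b := by
  induction a with
  | nil =>
    rcases List.infix_cons_iff.mp h with hp | hi
    · left; exact (pv_prefix_split l [] b c hp hc).isInfix
    · right; exact hi
  | cons z a' ih =>
    rcases List.infix_cons_iff.mp (by simpa using h) with hp | hi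
    · left
      exact (pv_prefix_split l (z :: a') b c (by simpa using hp) hc).isInfix
    · rcases ih hi with h1 | h2
      · exact Or.inl (h1.trans ((List.suffix_cons z a').isInfix))
      · exact Or.inr h2

-- membership in a '\n'-joined text, for a nonempty newline-free pattern
theorem pv_infix_join {sub : List Char} (c : Char) (parts : List (List Char))
    (hne : sub ≠ []) (hc : c ∉ sub) :
    sub <:+: PySem.Chars.join [c] parts ↔ ∃ p ∈ parts, sub <:+: p := by
  induction parts with
  | nil => simp [PySem.Chars.join_nil, List.infix_nil, hne]
  | cons p rest ih =>
    cases rest with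
    | nil => simp [PySem.Chars.join_singleton]
    | cons q rest' =>
      rw [PySem.Chars.join_cons_cons]
      constructor
      · intro h
        rcases pv_infix_split sub p (PySem.Chars.join [c] (q :: rest')) c (by simpa using h) hc with h1 | h2
        · exact ⟨p, List.mem_cons_self, h1⟩
        · rcases ih.mp h2 with ⟨r, hr, hrr⟩
          exact ⟨r, List.mem_cons_of_mem _ hr, hrr⟩
      · rintro ⟨r, hr, hrr⟩
        rcases List.mem_cons.mp hr with rfl | hr'
        · exact hrr.trans (by
            simpa [List.append_assoc] using
              (List.prefix_append r ([c] ++ PySem.Chars.join [c] (q :: rest'))).isInfix)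
        · have h2 : sub <:+: PySem.Chars.join [c] (q :: rest') := ih.mpr ⟨r, hr', hrr⟩
          exact h2.trans (List.suffix_append _ _).isInfix

-- membership and Nodup of A's inner fold over the verb map
theorem pv_mem_voteFold (l : List (String × List String)) (c : String → Bool)
    (s0 : PySem.Set String) (x : String) :
    x ∈ l.foldl (fun s vp => if c vp.1 then PySem.Set.update s vp.2 else s) s0 ↔
      x ∈ s0 ∨ ∃ vp ∈ l, c vp.1 = true ∧ x ∈ vp.2 := by
  induction l generalizing s0 with
  | nil => simp
  | cons vp rest ih =>
    rw [List.foldl_cons, ih]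
    by_cases h : c vp.1 = true
    · rw [if_pos h]
      constructor
      · rintro (hs | ⟨vp', hvp', hc', hx⟩)
        · rcases (PySem.Set.mem_update s0 vp.2 x).mp hs with hs0 | hx
          · exact Or.inl hs0
          · exact Or.inr ⟨vp, List.mem_cons_self, h, hx⟩
        · exact Or.inr ⟨vp', List.mem_cons_of_mem _ hvp', hc', hx⟩
      · rintro (hs0 | ⟨vp', hvp', hc', hx⟩)
        · exact Or.inl ((PySem.Set.mem_update s0 vp.2 x).mpr (Or.inl hs0))
        · rcases List.mem_cons.mp hvp' with rfl | hvp''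
          · exact Or.inl ((PySem.Set.mem_update s0 _ x).mpr (Or.inr hx))
          · exact Or.inr ⟨vp', hvp'', hc', hx⟩
    · rw [if_neg h]
      constructor
      · rintro (hs0 | ⟨vp', hvp', hc', hx⟩)
        · exact Or.inl hs0
        · exact Or.inr ⟨vp', List.mem_cons_of_mem _ hvp', hc', hx⟩
      · rintro (hs0 | ⟨vp', hvp', hc', hx⟩)
        · exact Or.inl hs0
        · rcases List.mem_cons.mp hvp' with rfl | hvp''
          · exact absurd hc' h
          · exact Or.inr ⟨vp', hvp'', hc', hx⟩

theorem pv_nodup_voteFold (l : List (String × List String)) (c : String → Bool)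
    (s0 : PySem.Set String) (h : s0.Nodup) :
    (l.foldl (fun s vp => if c vp.1 then PySem.Set.update s vp.2 else s) s0).Nodup := by
  induction l generalizing s0 with
  | nil => exact h
  | cons vp rest ih =>
    rw [List.foldl_cons]
    by_cases hc : c vp.1 = true
    · rw [if_pos hc]; exact ih _ (PySem.Set.nodup_update _ _ h)
    · rw [if_neg hc]; exact ih _ h

theorem pv_mem_outerFold (resp : List String) (s0 : PySem.Set String) (x : String) :
    x ∈ resp.foldl (fun s responsibility =>
        pvVerbMap.foldl (fun s vp =>
          if PySem.Str.isIn vp.1 (PySem.Str.lower responsibility) then PySem.Set.update s vp.2 else s) s) s0 ↔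
      x ∈ s0 ∨ ∃ r ∈ resp, ∃ vp ∈ pvVerbMap, PySem.Str.isIn vp.1 (PySem.Str.lower r) = true ∧ x ∈ vp.2 := by
  induction resp generalizing s0 with
  | nil => simp
  | cons r rest ih =>
    rw [List.foldl_cons, ih]
    constructor
    · rintro (hhead | ⟨r', hr', hrest⟩)
      · rcases (pv_mem_voteFold pvVerbMap (fun v => PySem.Str.isIn v (PySem.Str.lower r)) s0 x).mp hhead with hs | ⟨vp, hvp, hc, hx⟩
        · exact Or.inl hs
        · exact Or.inr ⟨r, List.mem_cons_self, vp, hvp, hc, hx⟩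
      · exact Or.inr ⟨r', List.mem_cons_of_mem _ hr', hrest⟩
    · rintro (hs | ⟨r', hr', vp, hvp, hc, hx⟩)
      · exact Or.inl ((pv_mem_voteFold pvVerbMap (fun v => PySem.Str.isIn v (PySem.Str.lower r)) s0 x).mpr (Or.inl hs))
      · rcases List.mem_cons.mp hr' with rfl | hr''
        · exact Or.inl ((pv_mem_voteFold pvVerbMap (fun v => PySem.Str.isIn v (PySem.Str.lower r')) s0 x).mpr (Or.inr ⟨vp, hvp, hc, hx⟩))
        · exact Or.inr ⟨r', hr'', vp, hvp, hc, hx⟩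

theorem pv_nodup_outerFold (resp : List String) (s0 : PySem.Set String) (h : s0.Nodup) :
    (resp.foldl (fun s responsibility =>
        pvVerbMap.foldl (fun s vp =>
          if PySem.Str.isIn vp.1 (PySem.Str.lower responsibility) then PySem.Set.update s vp.2 else s) s) s0).Nodup := by
  induction resp generalizing s0 with
  | nil => exact h
  | cons r rest ih =>
    rw [List.foldl_cons]
    exact ih _ (pv_nodup_voteFold pvVerbMap (fun v => PySem.Str.isIn v (PySem.Str.lower r)) s0 h)

-- each verb of A's map: nonempty, newline-free, and unchanged by lowercasing
theorem pv_verbs_ok : ∀ vp ∈ pvVerbMap, vp.1.toList ≠ [] ∧ '\n' ∉ vp.1.toList := by decide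

-- the (verb, skill) pairs of the two tables
def pvPairsA : List (String × String) :=
  pvVerbMap.flatMap (fun vp => vp.2.map (fun sk => (vp.1, sk)))

def pvPairsB : List (String × String) :=
  pvSkillVerbs.flatMap (fun sv => sv.2.map (fun verb => (verb, sv.1)))

-- the inverted index contains exactly the pairs of A's map
theorem pv_pairs_same (p : String × String) : p ∈ pvPairsA ↔ p ∈ pvPairsB := by
  have h1 : pvPairsA.all (fun p => decide (p ∈ pvPairsB)) = true := by decide
  have h2 : pvPairsB.all (fun p => decide (p ∈ pvPairsA)) = true := by decide
  rw [List.all_eq_true] at h1 h2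
  exact ⟨fun h => of_decide_eq_true (h1 p h), fun h => of_decide_eq_true (h2 p h)⟩

theorem pv_exists_pairsA (c : String → Bool) (x : String) :
    (∃ vp ∈ pvVerbMap, c vp.1 = true ∧ x ∈ vp.2) ↔ (∃ p ∈ pvPairsA, c p.1 = true ∧ p.2 = x) := by
  constructor
  · rintro ⟨vp, hvp, hc, hx⟩
    exact ⟨(vp.1, x), List.mem_flatMap.mpr ⟨vp, hvp, List.mem_map.mpr ⟨x, hx, rfl⟩⟩, hc, rfl⟩
  · rintro ⟨p, hp, hc, rfl⟩
    rcases List.mem_flatMap.mp hp with ⟨vp, hvp, hpm⟩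
    rcases List.mem_map.mp hpm with ⟨sk, hsk, h⟩
    cases h
    exact ⟨vp, hvp, hc, hsk⟩

theorem pv_exists_pairsB (c : String → Bool) (x : String) :
    (∃ sv ∈ pvSkillVerbs, (∃ v ∈ sv.2, c v = true) ∧ sv.1 = x) ↔
      (∃ p ∈ pvPairsB, c p.1 = true ∧ p.2 = x) := by
  constructor
  · rintro ⟨sv, hsv, ⟨v, hv, hc⟩, rfl⟩
    exact ⟨(v, sv.1), List.mem_flatMap.mpr ⟨sv, hsv, List.mem_map.mpr ⟨v, hv, rfl⟩⟩, hc, rfl⟩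
  · rintro ⟨p, hp, hc, rfl⟩
    rcases List.mem_flatMap.mp hp with ⟨sv, hsv, hpm⟩
    rcases List.mem_map.mp hpm with ⟨v, hv, h⟩
    cases h
    exact ⟨sv, hsv, ⟨v, hv, hc⟩, rfl⟩

-- lowercasing maps through a '\n'-join ('\n' lowercases to itself)
theorem pv_map_join (parts : List (List Char)) (f : Char → Char) :
    (PySem.Chars.join ['\n'] parts).map f = PySem.Chars.join [f '\n'] (parts.map (List.map f)) := by
  induction parts with
  | nil => simp [PySem.Chars.join_nil]
  | cons p rest ih =>
    cases rest with
    | nil => simp [PySem.Chars.join_singleton]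
    | cons q r => simp [PySem.Chars.join_cons_cons, ih]

theorem pv_combined_toList (resp : List String) :
    (PySem.Str.lower (PySem.Str.join "\n" resp)).toList =
      PySem.Chars.join ['\n'] (resp.map (fun r => (PySem.Str.lower r).toList)) := by
  have h1 : (PySem.Str.join "\n" resp).toList
      = PySem.Chars.join ['\n'] (resp.map String.toList) := by simp [PySem.Str.join]
  have h2 : ∀ s : String, (PySem.Str.lower s).toList = PySem.Chars.lower s.toList := by simp
  have h3 : ∀ cs : List Char, PySem.Chars.lower cs = cs.map PySem.Chars.lowerChar := fun _ => rfl
  rw [h2, h1, h3, pv_map_join, show PySem.Chars.lowerChar '\n' = '\n' from by decide]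
  simp [List.map_map, Function.comp_def, h2, h3]

-- a verb hits the combined lowercased text iff it hits some lowercased responsibility
theorem pv_verb_cond (resp : List String) (v : String)
    (hne : v.toList ≠ []) (hc : '\n' ∉ v.toList) :
    PySem.Str.isIn v (PySem.Str.lower (PySem.Str.join "\n" resp)) = true ↔
      ∃ r ∈ resp, PySem.Str.isIn v (PySem.Str.lower r) = true := by
  rw [PySem.Str.isIn_iff_infix, pv_combined_toList, pv_infix_join '\n' _ hne hc]
  constructor
  · rintro ⟨p, hp, hsub⟩
    rcases List.mem_map.mp hp with ⟨r, hr, rfl⟩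
    exact ⟨r, hr, (PySem.Str.isIn_iff_infix _ _).mpr hsub⟩
  · rintro ⟨r, hr, h⟩
    exact ⟨(PySem.Str.lower r).toList, List.mem_map.mpr ⟨r, hr, rfl⟩, (PySem.Str.isIn_iff_infix _ _).mp h⟩

theorem pv_mem_filterMap_fst (l : List (String × List String)) (f : String × List String → Bool) (x : String) :
    x ∈ (l.filter f).map (fun sv => sv.1) ↔ ∃ sv ∈ l, f sv = true ∧ sv.1 = x := by
  simp only [List.mem_map, List.mem_filter]
  tauto

set_option maxHeartbeats 1000000 in
theorem pv_AB (resp : List String) :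
    infer_soft_skills_from_responsibilities resp = infer_soft_skills_from_responsibilities_alt resp := by
  unfold infer_soft_skills_from_responsibilities infer_soft_skills_from_responsibilities_alt
  rw [PySem.List.sorted_id_eq_sorted_id_iff_perm]
  refine (List.perm_ext_iff_of_nodup ?_ ?_).mpr ?_
  · exact pv_nodup_outerFold resp PySem.Set.empty List.nodup_nil
  · exact PySem.Set.nodup_ofList _
  · intro x
    rw [pv_mem_outerFold, PySem.Set.mem_ofList]
    rw [pv_mem_filterMap_fst]
    simp only [List.any_eq_true]
    rw [pv_exists_pairsB]
    constructor
    · rintro (h | ⟨r, hr, vp, hvp, hcond, hx⟩)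
      · exact absurd h (List.not_mem_nil)
      · have hA : ∃ vp ∈ pvVerbMap,
            PySem.Str.isIn vp.1 (PySem.Str.lower (PySem.Str.join "\n" resp)) = true ∧ x ∈ vp.2 := by
          obtain ⟨hne, hcnl⟩ := pv_verbs_ok vp hvp
          exact ⟨vp, hvp, (pv_verb_cond resp vp.1 hne hcnl).mpr ⟨r, hr, hcond⟩, hx⟩
        rcases (pv_exists_pairsA (fun v => PySem.Str.isIn v (PySem.Str.lower (PySem.Str.join "\n" resp))) x).mp hA with ⟨p, hp, hc, hpx⟩
        exact ⟨p, (pv_pairs_same p).mp hp, hc, hpx⟩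
    · rintro ⟨p, hp, hc, hpx⟩
      have hA := (pv_exists_pairsA
          (fun v => PySem.Str.isIn v (PySem.Str.lower (PySem.Str.join "\n" resp))) x).mpr
          ⟨p, (pv_pairs_same p).mpr hp, hc, hpx⟩
      rcases hA with ⟨vp, hvp, hcond, hx⟩
      obtain ⟨hne, hcnl⟩ := pv_verbs_ok vp hvp
      rcases (pv_verb_cond resp vp.1 hne hcnl).mp hcond with ⟨r, hr, hcr⟩
      exact Or.inr ⟨r, hr, vp, hvp, hcr, hx⟩

-- ===== VERDICT (by name: the statement is the Claim_ definition above) =====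
theorem infer_soft_skills_from_responsibilities_spec : Claim_equal_infer_soft_skills_from_responsibilities := by
  intro responsibilities _
  unfold Spec_infer_soft_skills_from_responsibilities
  exact pv_AB responsibilities
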